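-- pv_equiv track=rewrite | github.com/SirGiggles2/Its-a-secret-to-everyone | tools/extract_enemies.py | build_pointer_labels
-- ===== SOURCE A (Python) =====
-- def build_pointer_labels(addresses, prefix):
--     labels_by_addr = {}
--     table_labels = []
--     for addr in addresses:
--         if addr not in labels_by_addr:
--             labels_by_addr[addr] = f"{prefix}{len(labels_by_addr):02d}"
--         table_labels.append(labels_by_addr[addr])
--     ordered_addrs = sorted(labels_by_addr)
--     return labels_by_addr, table_labels, ordered_addrs
-- ===== SOURCE B (Python) =====
-- def build_pointer_labels(addresses, prefix):
--     # Reverse scan: later (i.e. earlier-index) writes overwrite, so each address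
--     # ends up mapped to its FIRST occurrence index -- no membership test needed.
--     first = {}
--     for i, a in reversed(list(enumerate(addresses))):
--         first[a] = i
--     # Recover first-appearance order by sorting on the first-occurrence index.
--     order = sorted(first, key=first.get)
--     labels_by_addr = {a: "%s%02d" % (prefix, n) for n, a in enumerate(order)}
--     table_labels = [labels_by_addr[a] for a in addresses]
--     return labels_by_addr, table_labels, sorted(order)
-- ===== Notes on version B (the rewrite author's own statement) =====
-- stated objective: alternative
-- what changed: Instead of growing the label dict online with a membership test per element, B computes each address's first-occurrence index by a reverse scan with overwriting (no membership test), recovers first-appearance order by sorting on those indices, then labels and maps in separate passes.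
import Mathlib
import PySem

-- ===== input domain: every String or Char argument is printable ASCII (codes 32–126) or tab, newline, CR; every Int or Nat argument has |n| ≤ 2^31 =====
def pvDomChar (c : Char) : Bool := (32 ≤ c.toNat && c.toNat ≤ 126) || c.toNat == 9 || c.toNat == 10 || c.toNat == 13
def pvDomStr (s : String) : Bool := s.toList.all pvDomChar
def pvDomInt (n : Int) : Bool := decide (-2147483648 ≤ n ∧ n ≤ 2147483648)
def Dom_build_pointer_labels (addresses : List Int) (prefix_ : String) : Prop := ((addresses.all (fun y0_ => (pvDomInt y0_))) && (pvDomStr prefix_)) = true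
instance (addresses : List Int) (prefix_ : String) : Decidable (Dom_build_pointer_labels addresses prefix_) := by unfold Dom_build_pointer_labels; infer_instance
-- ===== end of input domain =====

-- B replaces A's online dict-growing loop by a reverse scan that records first-occurrence
-- indices by overwriting, then sorts by those indices to recover appearance order; objective: alternative, same cost.

-- f"{prefix}{n:02d}" / "%s%02d" % (prefix, n) for n ≥ 0 (exact: zfill pads with '0' to width 2)
def pvLbl (prefix_ : String) (n : Int) : String := prefix_ ++ PySem.Str.zfill (PySem.Int.toStr n) 2

-- ===== PORT A =====
def build_pointer_labels (addresses : List Int) (prefix_ : String) : (List (Int × String)) × List String × List Int :=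
  let st := addresses.foldl
    (fun (st : PySem.Dict Int String × List String) addr =>
      let d := if st.1.contains addr then st.1 else st.1.insert addr (pvLbl prefix_ (st.1.size : Int))
      (d, st.2 ++ [(d.get? addr).getD ""]))
    (PySem.Dict.empty, [])
  (st.1.items, st.2, PySem.List.sorted st.1.keys (fun x => x) false)

-- ===== PORT B =====
def build_pointer_labels_alt (addresses : List Int) (prefix_ : String) : (List (Int × String)) × List String × List Int :=
  -- for i, a in reversed(list(enumerate(addresses))): first[a] = i
  let first := ((PySem.List.enumerate addresses).reverse).foldl
    (fun (d : PySem.Dict Int Int) p => d.insert p.2 p.1) PySem.Dict.empty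
  -- order = sorted(first, key=first.get)  (every key is present, so first.get returns its int index)
  let order := PySem.List.sorted first.keys (fun a => (first.get? a).getD 0) false
  let labels_by_addr := PySem.Dict.ofList ((PySem.List.enumerate order).map (fun p => (p.2, pvLbl prefix_ p.1)))
  let table_labels := addresses.map (fun a => (labels_by_addr.get? a).getD "")
  (labels_by_addr.items, table_labels, PySem.List.sorted order (fun x => x) false)

-- ===== PRECONDITION & SPEC =====
def Spec_build_pointer_labels (addresses : List Int) (prefix_ : String) (out : (List (Int × String)) × List String × List Int) : Prop := out = build_pointer_labels_alt addresses prefix_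
instance (addresses : List Int) (prefix_ : String) (out : (List (Int × String)) × List String × List Int) : Decidable (Spec_build_pointer_labels addresses prefix_ out) := by unfold Spec_build_pointer_labels; infer_instance

-- ===== CLAIM (what is proved, stated in full; the proofs are below) =====
def Claim_equal_build_pointer_labels : Prop := ∀ (addresses : List Int) (prefix_ : String), Dom_build_pointer_labels addresses prefix_ → Spec_build_pointer_labels addresses prefix_ (build_pointer_labels addresses prefix_)

-- ===== LEMMAS AND PROOFS =====

-- the dict of labels keyed by first-appearance order, as a function of the input
def pvD (prefix_ : String) (xs : List Int) : PySem.Dict Int String :=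
  PySem.Dict.ofList ((PySem.List.enumerate (PySem.List.dedup xs)).map (fun p => (p.2, pvLbl prefix_ p.1)))

-- B's "first" dict, with an explicit enumerate start for the induction
def pvF (xs : List Int) (s : Int) : PySem.Dict Int Int :=
  ((PySem.List.enumerate xs s).reverse).foldl (fun (d : PySem.Dict Int Int) p => d.insert p.2 p.1) PySem.Dict.empty

lemma pvF_cons (x : Int) (xs : List Int) (s : Int) :
    pvF (x :: xs) s = (pvF xs (s + 1)).insert x s := by
  simp [pvF, PySem.List.enumerate_cons, List.foldl_append]

lemma pvF_get? (xs : List Int) (s : Int) (a : Int) :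
    (pvF xs s).get? a = (PySem.List.index? xs a).map (fun n => s + (n : Int)) := by
  induction xs generalizing s with
  | nil => simp [pvF, PySem.List.enumerate, PySem.Dict.get?_empty, PySem.List.index?]
  | cons x xs ih =>
    rw [pvF_cons]
    by_cases h : a = x
    · subst h
      rw [PySem.Dict.get?_insert_self, PySem.List.index?_cons_self]
      simp
    · rw [PySem.Dict.get?_insert_of_ne _ _ h, ih,
        PySem.List.index?_cons_of_ne _ (fun he => h he.symm)]
      cases PySem.List.index? xs a with
      | none => rfl
      | some k => simp; omega

lemma pvF_mem_keys (xs : List Int) (s : Int) (a : Int) :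
    a ∈ (pvF xs s).keys ↔ a ∈ xs := by
  rw [← PySem.Dict.contains_iff_mem_keys, PySem.Dict.contains_eq_isSome_get?, pvF_get?]
  cases hix : PySem.List.index? xs a with
  | none => simpa using (PySem.List.index?_eq_none_iff xs a).mp hix
  | some k =>
    have : a ∈ xs := (PySem.List.index?_isSome_iff xs a).mp (by rw [hix]; rfl)
    simpa using this

lemma pvF_nodup_keys (xs : List Int) (s : Int) : (pvF xs s).keys.Nodup := by
  unfold pvF
  exact PySem.Dict.nodup_keys_foldl_insert_key ((PySem.List.enumerate xs s).reverse) (fun p => p.2) (fun _ p => p.1) _ PySem.Dict.nodup_keys_empty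

-- the first-occurrence indices along dedup xs are strictly increasing
lemma dedup_pairwise_index (xs : List Int) :
    (PySem.List.dedup xs).Pairwise
      (fun a b => ((PySem.List.index? xs a).map (fun n => (n : Int))).getD 0
                < ((PySem.List.index? xs b).map (fun n => (n : Int))).getD 0) := by
  induction xs using List.reverseRecOn with
  | nil => simp [PySem.List.dedup_eq_ofList, PySem.Set.ofList_nil]
  | append_singleton xs x ih =>
    rw [PySem.List.dedup_eq_ofList, PySem.Set.ofList_append_singleton]
    by_cases h : x ∈ PySem.Set.ofList xs
    · rw [PySem.Set.add_of_mem h]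
      refine List.Pairwise.imp_of_mem ?_ (by rw [← PySem.List.dedup_eq_ofList]; exact ih)
      intro a b ha hb hab
      have ha' : a ∈ xs := (PySem.Set.mem_ofList _ _).mp ha
      have hb' : b ∈ xs := (PySem.Set.mem_ofList _ _).mp hb
      rwa [PySem.List.index?_append_of_mem _ ha', PySem.List.index?_append_of_mem _ hb']
    · rw [PySem.Set.add_of_not_mem h]
      have hx : x ∉ xs := fun hx => h ((PySem.Set.mem_ofList _ _).mpr hx)
      rw [List.pairwise_append]
      refine ⟨?_, by simp, ?_⟩
      · refine List.Pairwise.imp_of_mem ?_ (by rw [← PySem.List.dedup_eq_ofList]; exact ih)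
        intro a b ha hb hab
        have ha' : a ∈ xs := (PySem.Set.mem_ofList _ _).mp ha
        have hb' : b ∈ xs := (PySem.Set.mem_ofList _ _).mp hb
        rwa [PySem.List.index?_append_of_mem _ ha', PySem.List.index?_append_of_mem _ hb']
      · intro a ha b hb
        have ha' : a ∈ xs := (PySem.Set.mem_ofList _ _).mp ha
        have hb' : b = x := by simpa using hb
        subst hb'
        rw [PySem.List.index?_append_of_mem _ ha',
          PySem.List.index?_append_singleton_self _ _ hx]
        obtain ⟨k, hk⟩ := Option.isSome_iff_exists.mp ((PySem.List.index?_isSome_iff xs a).mpr ha')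
        obtain ⟨pre, suf, hxs, hpre, _⟩ := (PySem.List.index?_eq_some_iff xs a k).mp hk
        have : k < xs.length := by subst hxs; simp [← hpre]
        rw [hk]; simp; omega

-- B's sort by first-occurrence index recovers first-appearance order (= dedup)
lemma pvF_sorted_keys (xs : List Int) :
    PySem.List.sorted (pvF xs 0).keys (fun a => ((pvF xs 0).get? a).getD 0) false
      = PySem.List.dedup xs := by
  apply PySem.List.sorted_eq_of_perm_of_pairwise_lt
  · exact (List.perm_ext_iff_of_nodup (PySem.List.nodup_dedup xs) (pvF_nodup_keys xs 0)).mpr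
      (fun a => by rw [pvF_mem_keys, PySem.List.mem_dedup])
  · refine List.Pairwise.imp_of_mem ?_ (dedup_pairwise_index xs)
    intro a b _ _ hab
    rw [pvF_get?, pvF_get?]
    simpa using hab

-- (kept from the original development: characterisation of A's loop in terms of pvD)
lemma pvD_items (prefix_ : String) (xs : List Int) :
    (pvD prefix_ xs).items = (PySem.List.enumerate (PySem.List.dedup xs)).map (fun p => (p.2, pvLbl prefix_ p.1)) := by
  simp only [pvD, PySem.Dict.ofList, PySem.Dict.update]
  rw [PySem.Dict.items_foldl_insert_fresh _ Prod.fst Prod.snd _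
      (fun a _ => PySem.Dict.contains_empty _)
      (by rw [List.map_map]
          exact (PySem.List.map_snd_enumerate _ _) ▸ PySem.List.nodup_dedup xs)]
  simp [PySem.Dict.empty]

lemma pvD_keys (prefix_ : String) (xs : List Int) : (pvD prefix_ xs).keys = PySem.List.dedup xs := by
  show (pvD prefix_ xs).items.map Prod.fst = _
  rw [pvD_items, List.map_map]
  exact PySem.List.map_snd_enumerate _ _

lemma pvD_contains (prefix_ : String) (xs : List Int) (a : Int) :
    (pvD prefix_ xs).contains a = decide (a ∈ xs) := by
  rw [PySem.Dict.contains_eq_decide_mem_keys, pvD_keys]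
  simp only [decide_eq_decide]
  exact PySem.List.mem_dedup _ _

lemma dedup_append_singleton (xs : List Int) (a : Int) :
    PySem.List.dedup (xs ++ [a]) = if a ∈ xs then PySem.List.dedup xs else PySem.List.dedup xs ++ [a] := by
  simp only [PySem.List.dedup_eq_ofList, PySem.Set.ofList_eq_foldl, List.foldl_append,
    List.foldl_cons, List.foldl_nil]
  rw [show List.foldl PySem.Set.add [] xs = PySem.Set.ofList xs from (PySem.Set.ofList_eq_foldl xs).symm]
  unfold PySem.Set.add
  by_cases h : a ∈ xs
  · simp [h]
  · simp [h]

lemma pvD_append_mem (prefix_ : String) (xs : List Int) (a : Int) (h : a ∈ xs) :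
    pvD prefix_ (xs ++ [a]) = pvD prefix_ xs := by
  unfold pvD
  rw [dedup_append_singleton, if_pos h]

lemma pvD_append_new (prefix_ : String) (xs : List Int) (a : Int) (h : a ∉ xs) :
    pvD prefix_ (xs ++ [a]) = (pvD prefix_ xs).insert a (pvLbl prefix_ ((pvD prefix_ xs).size : Int)) := by
  apply PySem.Dict.ext
  rw [PySem.Dict.items_insert_of_not_contains _ _ (by rw [pvD_contains]; simp [h]),
    pvD_items, pvD_items]
  conv_lhs => rw [dedup_append_singleton, if_neg h]
  rw [PySem.List.enumerate_append, List.map_append]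
  have hsz : ((pvD prefix_ xs).size : Int) = ((PySem.List.dedup xs).length : Int) := by
    have : (pvD prefix_ xs).size = (pvD prefix_ xs).items.length := rfl
    rw [this, pvD_items]
    simp [PySem.List.length_enumerate]
  simp [PySem.List.enumerate, hsz]

lemma pvD_get?_stable (prefix_ : String) (xs : List Int) (a b : Int) (hb : b ∈ xs) :
    (pvD prefix_ (xs ++ [a])).get? b = (pvD prefix_ xs).get? b := by
  by_cases h : a ∈ xs
  · rw [pvD_append_mem _ _ _ h]
  · rw [pvD_append_new _ _ _ h,
      PySem.Dict.get?_insert_of_ne _ _ (fun hba => h (by rw [← hba]; exact hb))]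

-- loop invariant for A's fold
lemma foldA_inv (prefix_ : String) (xs : List Int) :
    xs.foldl
      (fun (st : PySem.Dict Int String × List String) addr =>
        let d := if st.1.contains addr then st.1 else st.1.insert addr (pvLbl prefix_ (st.1.size : Int))
        (d, st.2 ++ [(d.get? addr).getD ""]))
      (PySem.Dict.empty, [])
    = (pvD prefix_ xs, xs.map (fun a => ((pvD prefix_ xs).get? a).getD "")) := by
  induction xs using List.reverseRecOn with
  | nil => rfl
  | append_singleton xs a ih =>
    rw [List.foldl_append, ih]
    simp only [List.foldl_cons, List.foldl_nil]
    by_cases h : a ∈ xs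
    · have hc : (pvD prefix_ xs).contains a = true := by rw [pvD_contains]; simp [h]
      simp only [hc, if_true, pvD_append_mem _ _ _ h, List.map_append, List.map_cons, List.map_nil]
    · have hc : (pvD prefix_ xs).contains a = false := by rw [pvD_contains]; simp [h]
      simp only [hc, Bool.false_eq_true, if_false]
      rw [← pvD_append_new _ _ _ h]
      refine Prod.ext rfl ?_
      rw [List.map_append]
      simp only [List.map_cons, List.map_nil]
      congr 1
      exact (List.map_congr_left (fun b hb => by rw [pvD_get?_stable _ _ _ _ hb])).symm

-- ===== VERDICT (by name: the statement is the Claim_ definition above) =====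
theorem build_pointer_labels_spec : Claim_equal_build_pointer_labels := by
  intro addresses prefix_ _
  unfold Spec_build_pointer_labels build_pointer_labels build_pointer_labels_alt
  rw [show ((PySem.List.enumerate addresses).reverse).foldl
        (fun (d : PySem.Dict Int Int) p => d.insert p.2 p.1) PySem.Dict.empty = pvF addresses 0 from rfl]
  simp only [foldA_inv, pvD_keys, pvF_sorted_keys]
  rfl
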